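-- pv_equiv track=rewrite | github.com/raywiis/advent-of-code-2020 | day-16.py | rule_columns
-- ===== SOURCE A (Python) =====
-- def matches_constraint(v, constraint):
--     (_, [[lr1, ur1], [lr2, ur2]]) = constraint
--     match_1 = v >= lr1 and v <= ur1
--     match_2 = v >= lr2 and v <= ur2
--     return match_1 or match_2
--
-- def rule_columns(rule, valid_tickets):
--     cols = []
--     for col in range(len(valid_tickets[0])):
--         for t in valid_tickets:
--             if not matches_constraint(t[col], rule):
--                 cols += [0]
--                 break
--         else:
--             cols += [1]
--
--     return cols
-- ===== SOURCE B (Python) =====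
-- def matches_constraint(v, constraint):
--     (_, [[lr1, ur1], [lr2, ur2]]) = constraint
--     match_1 = v >= lr1 and v <= ur1
--     match_2 = v >= lr2 and v <= ur2
--     return match_1 or match_2
--
-- def rule_columns(rule, valid_tickets):
--     n = len(valid_tickets[0])
--     cols = [1] * n
--     for t in valid_tickets:
--         cols = [c if matches_constraint(t[i], rule) else 0 for i, c in enumerate(cols)]
--     return cols
-- ===== Notes on version B (the rewrite author's own statement) =====
-- stated objective: alternative
-- what changed: Row-major single sweep keeping a per-column validity accumulator (start all-1, zero a column on any mismatch) instead of A's column-major nested scan with early break per column.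
-- outside the precondition, e.g. on rule_columns(('r', [[0, 5], [10, 20]]), [[7], []]): A returns [0], B raises IndexError
import Mathlib
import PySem

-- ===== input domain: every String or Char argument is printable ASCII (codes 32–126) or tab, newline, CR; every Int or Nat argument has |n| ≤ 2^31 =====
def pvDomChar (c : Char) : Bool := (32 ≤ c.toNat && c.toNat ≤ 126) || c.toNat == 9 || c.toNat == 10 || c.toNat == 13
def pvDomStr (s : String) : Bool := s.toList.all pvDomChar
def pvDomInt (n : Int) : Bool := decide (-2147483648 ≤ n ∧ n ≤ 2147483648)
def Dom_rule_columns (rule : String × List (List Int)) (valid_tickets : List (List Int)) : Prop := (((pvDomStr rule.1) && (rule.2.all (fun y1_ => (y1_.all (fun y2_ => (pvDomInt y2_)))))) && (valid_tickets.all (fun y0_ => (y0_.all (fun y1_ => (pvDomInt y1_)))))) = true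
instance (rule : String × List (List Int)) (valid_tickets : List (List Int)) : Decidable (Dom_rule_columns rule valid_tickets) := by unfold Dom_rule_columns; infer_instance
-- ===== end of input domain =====

-- B replaces A's column-major nested scan (early break per column) by a row-major sweep
-- maintaining a per-column validity accumulator; objective: alternative decomposition, same cost.

-- ===== PORT A =====
-- shared module helper matches_constraint: the `_ => false` arm is where Python's
-- unpacking raises ValueError; Pre_ excludes reaching it.
def matches_constraint (v : Int) (constraint : String × List (List Int)) : Bool :=
  match constraint.2 with
  | [[lr1, ur1], [lr2, ur2]] =>
      (decide (v ≥ lr1) && decide (v ≤ ur1)) || (decide (v ≥ lr2) && decide (v ≤ ur2))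
  | _ => false

-- inner `for t in valid_tickets … break / else` loop of A for one column
-- (`.getD 0` stands where Python's t[col] would raise IndexError; Pre_ excludes it)
def ruleColsInner (rule : String × List (List Int)) (ts : List (List Int)) (col : Nat) : Int :=
  match ts with
  | [] => 1
  | t :: rest =>
      if ¬ matches_constraint ((PySem.List.pyGet? t (col : Int)).getD 0) rule then 0
      else ruleColsInner rule rest col

def rule_columns (rule : String × List (List Int)) (valid_tickets : List (List Int)) : List Int :=
  -- len(valid_tickets[0]); `.getD []` stands where Python raises IndexError on empty input
  (List.range ((PySem.List.pyGet? valid_tickets (0 : Int)).getD []).length).foldl (fun cols col => cols ++ [ruleColsInner rule valid_tickets col]) []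

-- ===== PORT B =====
def rule_columns_alt (rule : String × List (List Int)) (valid_tickets : List (List Int)) : List Int :=
  valid_tickets.foldl
    (fun cols t =>
      (PySem.List.enumerate cols).map (fun ic =>
        if matches_constraint ((PySem.List.pyGet? t ic.1).getD 0) rule then ic.2 else 0))
    (List.replicate ((PySem.List.pyGet? valid_tickets (0 : Int)).getD []).length (1 : Int))

-- ===== PRECONDITION & SPEC =====
-- Pre_ excludes exactly the inputs where Python A raises: empty valid_tickets (IndexError on
-- valid_tickets[0]), rows shorter than row 0 (t[col] may raise IndexError; A returns on some
-- such ragged inputs only when an earlier mismatch breaks first — those accidental returns are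
-- excluded too, see cites), and, when any column exists, a rule whose ranges are not a 2×2 list
-- (ValueError on unpacking).
def Pre_rule_columns (rule : String × List (List Int)) (valid_tickets : List (List Int)) : Prop :=
  valid_tickets ≠ [] ∧
  (∀ t ∈ valid_tickets, (valid_tickets.headD []).length ≤ t.length) ∧
  ((valid_tickets.headD []).length = 0 ∨
    (rule.2.length = 2 ∧ ∀ l ∈ rule.2, l.length = 2))
instance (rule : String × List (List Int)) (valid_tickets : List (List Int)) : Decidable (Pre_rule_columns rule valid_tickets) := by unfold Pre_rule_columns; infer_instance

def pvWitness_rule_columns : (String × List (List Int)) × List (List Int) :=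
  (("r", [[0, 5], [10, 20]]), [[3], [12]])

def Spec_rule_columns (rule : String × List (List Int)) (valid_tickets : List (List Int)) (out : List Int) : Prop := out = rule_columns_alt rule valid_tickets
instance (rule : String × List (List Int)) (valid_tickets : List (List Int)) (out : List Int) : Decidable (Spec_rule_columns rule valid_tickets out) := by unfold Spec_rule_columns; infer_instance

-- ===== CLAIM (what is proved, stated in full; the proofs are below) =====
def Claim_equal_rule_columns : Prop := ∀ (rule : String × List (List Int)) (valid_tickets : List (List Int)), Dom_rule_columns rule valid_tickets → Pre_rule_columns rule valid_tickets → Spec_rule_columns rule valid_tickets (rule_columns rule valid_tickets)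

-- ===== LEMMAS AND PROOFS =====

-- A's outer loop (append one result per column) is a map over the column range
theorem foldl_append_singleton {α β : Type} (f : α → β) :
    ∀ (l : List α) (acc : List β),
      l.foldl (fun cols x => cols ++ [f x]) acc = acc ++ l.map f := by
  intro l
  induction l with
  | nil => simp
  | cons x xs ih => intro acc; simp [List.foldl, ih]

-- A's inner loop computes "all tickets match at this column"
theorem ruleColsInner_eq_all (rule : String × List (List Int)) (ts : List (List Int)) (col : Nat) :
    ruleColsInner rule ts col =
      (if ts.all (fun t => matches_constraint ((PySem.List.pyGet? t (col : Int)).getD 0) rule)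
       then 1 else 0) := by
  induction ts with
  | nil => simp [ruleColsInner]
  | cons t rest ih =>
      rw [ruleColsInner, ih]
      cases h : matches_constraint ((PySem.List.pyGet? t (col : Int)).getD 0) rule <;>
        simp only [List.all_cons, h, Bool.false_and, Bool.true_and] <;> simp

-- one row-step of B on a column-indexed accumulator, as a map over the column range
theorem enum_step (rule : String × List (List Int)) (t : List Int) (f : Nat → Int) (n : Nat) :
    (PySem.List.enumerate ((List.range n).map f)).map
        (fun ic => if matches_constraint ((PySem.List.pyGet? t ic.1).getD 0) rule then ic.2 else 0)
      = (List.range n).map (fun i : Nat =>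
          if matches_constraint ((PySem.List.pyGet? t (i : Int)).getD 0) rule then f i else 0) := by
  apply List.ext_getElem <;> simp [PySem.List.getElem_enumerate]

-- invariant of B's fold: the accumulator stays a 0/1 image of a per-column predicate
theorem alt_fold_inv (rule : String × List (List Int)) (n : Nat) :
    ∀ (ts : List (List Int)) (p : Nat → Bool),
      ts.foldl
        (fun cols t =>
          (PySem.List.enumerate cols).map (fun ic =>
            if matches_constraint ((PySem.List.pyGet? t ic.1).getD 0) rule then ic.2 else 0))
        ((List.range n).map (fun i => if p i then (1 : Int) else 0)) =
      (List.range n).map (fun i =>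
        if p i && ts.all (fun t => matches_constraint ((PySem.List.pyGet? t (i : Int)).getD 0) rule)
        then (1 : Int) else 0) := by
  intro ts
  induction ts with
  | nil => intro p; simp
  | cons t rest ih =>
      intro p
      simp only [List.foldl, List.all_cons]
      rw [enum_step]
      have hstep :
          (List.range n).map (fun i : Nat =>
              if matches_constraint ((PySem.List.pyGet? t (i : Int)).getD 0) rule then
                (if p i then (1 : Int) else 0) else 0) =
          (List.range n).map (fun i =>
              if (fun j : Nat => p j && matches_constraint ((PySem.List.pyGet? t (j : Int)).getD 0) rule) i
              then (1 : Int) else 0) := by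
        apply List.map_congr_left
        intro i _
        by_cases hm : matches_constraint ((PySem.List.pyGet? t (i : Int)).getD 0) rule = true <;>
          by_cases hp : p i = true <;> simp [hp]
      rw [hstep, ih]
      apply List.map_congr_left
      intro i _
      by_cases hp : p i = true <;>
        by_cases hm : matches_constraint ((PySem.List.pyGet? t (i : Int)).getD 0) rule = true <;>
          simp [hp, hm]

-- ===== VERDICT (by name: the statement is the Claim_ definition above) =====
theorem rule_columns_spec : Claim_equal_rule_columns := by
  intro rule valid_tickets _ _
  unfold Spec_rule_columns rule_columns rule_columns_alt
  rw [foldl_append_singleton]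
  have hrep : List.replicate ((PySem.List.pyGet? valid_tickets (0 : Int)).getD []).length (1 : Int)
      = (List.range ((PySem.List.pyGet? valid_tickets (0 : Int)).getD []).length).map
          (fun i => if (fun _ => true) i then (1 : Int) else 0) := by
    simp
  rw [hrep, alt_fold_inv]
  simp [ruleColsInner_eq_all]
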